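-- pv_equiv track=rewrite | github.com/Tequilaphazzz/google-docs-to-mkdocs-converter | gdocs_to_md_convertrer.py | ensure_proper_code_block_spacing
-- ===== SOURCE A (Python) =====
-- def ensure_proper_code_block_spacing(content):
--     """
--     Ensure proper spacing around code blocks:
--     - Remove empty lines after opening code blocks (```)
--     - Ensure empty line after closing code blocks (```)
--     unless it's at the end of the document or followed by another code block
--     """
--     lines = content.splitlines()
--     processed_lines = []
--     in_code_block = False
--
--     i = 0
--     while i < len(lines):
--         line = lines[i]
--         processed_lines.append(line)
--
--         # Check if current line is opening or closing code block
--         if line.strip() == "```":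
--             if not in_code_block:
--                 # This is an opening code block
--                 in_code_block = True
--
--                 # Check if next line is empty and remove it
--                 next_line_index = i + 1
--                 if (next_line_index < len(lines) and
--                         lines[next_line_index].strip() == ""):
--                     # Skip the empty line after opening ```
--                     i += 1  # Skip the empty line
--
--             else:
--                 # This is a closing code block
--                 in_code_block = False
--
--                 # Look ahead to see what comes next
--                 next_line_index = i + 1
--
--                 # Check if this is the end of document
--                 if next_line_index >= len(lines):
--                     # End of document, no need to add empty line
--                     pass
--                 else:
--                     next_line = lines[next_line_index]
--
--                     # If next line is not empty and not another code block
--                     if next_line.strip() != "" and next_line.strip() != "```":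
--                         # Add empty line after closing code block
--                         processed_lines.append("")
--
--         i += 1
--
--     return '\n'.join(processed_lines)
-- ===== SOURCE B (Python) =====
-- def ensure_proper_code_block_spacing(content):
--     # Single forward pass tracking the previous input line's fence classification
--     # (lookbehind flags) instead of A's index-arithmetic lookahead.
--     out = []
--     in_code_block = False
--     prev_open = False
--     prev_close = False
--     for line in content.splitlines():
--         s = line.strip()
--         if prev_open and s == "":
--             # the single blank right after an opening fence is dropped
--             prev_open = False
--             continue
--         if prev_close and s != "" and s != "```":
--             out.append("")
--         if s == "```":
--             if not in_code_block:
--                 in_code_block = True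
--                 prev_open, prev_close = True, False
--             else:
--                 in_code_block = False
--                 prev_open, prev_close = False, True
--         else:
--             prev_open, prev_close = False, False
--         out.append(line)
--     return '\n'.join(out)
-- ===== Notes on version B (the rewrite author's own statement) =====
-- stated objective: simpler
-- what changed: Replaces A's index-driven while loop with lookahead at lines[i+1] and manual i += 1 skipping by a single lookbehind fold over the lines that carries prev-open/prev-close fence flags and decides each line locally.
import Mathlib
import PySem

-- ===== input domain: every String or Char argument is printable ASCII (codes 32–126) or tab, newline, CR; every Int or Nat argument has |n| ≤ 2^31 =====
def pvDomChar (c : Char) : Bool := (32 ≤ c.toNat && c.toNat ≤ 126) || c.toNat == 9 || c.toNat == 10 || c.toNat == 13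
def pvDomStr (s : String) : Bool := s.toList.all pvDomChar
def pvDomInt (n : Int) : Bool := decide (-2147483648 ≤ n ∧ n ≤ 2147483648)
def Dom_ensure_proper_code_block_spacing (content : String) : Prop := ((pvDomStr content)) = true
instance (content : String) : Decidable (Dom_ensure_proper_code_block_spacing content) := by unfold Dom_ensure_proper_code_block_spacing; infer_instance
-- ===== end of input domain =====

-- B replaces A's index-arithmetic lookahead with a single lookbehind fold over the lines (same cost, simpler state machine).


-- ===== PORT A =====
-- A's while loop over an index i, with lookahead at lines[i+1] and the occasional extra
-- i += 1, transcribed as recursion on the remaining lines with the same accumulator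
-- `processed_lines` and `in_code_block` state (the lookahead is the head of `rest`).
def pvLoopA : List String → Bool → List String → List String
  | [], _, acc => acc
  | line :: rest, inCode, acc =>
    let acc2 := acc ++ [line]
    if PySem.Str.strip line = "```" then
      if inCode = false then
        -- opening fence: if the next line is blank, skip it (A's extra i += 1)
        match rest with
        | next :: rest2 =>
          if PySem.Str.strip next = "" then pvLoopA rest2 true acc2
          else pvLoopA (next :: rest2) true acc2
        | [] => pvLoopA [] true acc2
      else
        -- closing fence: look ahead; maybe append an empty line
        match rest with
        | [] => pvLoopA [] false acc2
        | next :: rest2 =>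
          if PySem.Str.strip next ≠ "" ∧ PySem.Str.strip next ≠ "```" then
            pvLoopA (next :: rest2) false (acc2 ++ [""])
          else pvLoopA (next :: rest2) false acc2
    else pvLoopA rest inCode acc2
termination_by l _ _ => l.length
decreasing_by all_goals (simp; try omega)

def ensure_proper_code_block_spacing (content : String) : String :=
  PySem.Str.join "\n" (pvLoopA (PySem.Str.splitlines content) false [])

-- ===== PORT B =====
-- B's loop body: state (out, in_code_block, prev_open, prev_close), lookbehind flags.
def pvStepB (st : List String × Bool × Bool × Bool) (line : String) :
    List String × Bool × Bool × Bool :=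
  let (acc, ic, po, pc) := st
  let s := PySem.Str.strip line
  if po = true ∧ s = "" then (acc, ic, false, pc)   -- drop the blank after an opening fence
  else
    let acc2 := if pc = true ∧ s ≠ "" ∧ s ≠ "```" then acc ++ [""] else acc
    if s = "```" then
      if ic = false then (acc2 ++ [line], true, true, false)
      else (acc2 ++ [line], false, false, true)
    else (acc2 ++ [line], ic, false, false)

def ensure_proper_code_block_spacing_alt (content : String) : String :=
  PySem.Str.join "\n"
    ((PySem.Str.splitlines content).foldl pvStepB ([], false, false, false)).1

-- ===== PRECONDITION & SPEC =====
def Spec_ensure_proper_code_block_spacing (content : String) (out : String) : Prop := out = ensure_proper_code_block_spacing_alt content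
instance (content : String) (out : String) : Decidable (Spec_ensure_proper_code_block_spacing content out) := by unfold Spec_ensure_proper_code_block_spacing; infer_instance

-- ===== CLAIM (what is proved, stated in full; the proofs are below) =====
def Claim_equal_ensure_proper_code_block_spacing : Prop := ∀ (content : String), Dom_ensure_proper_code_block_spacing content → Spec_ensure_proper_code_block_spacing content (ensure_proper_code_block_spacing content)

-- ===== LEMMAS AND PROOFS =====

-- Correspondence of B's fold, in each of its three reachable flag states, with A's loop.
theorem pv_main (lines : List String) :
    (∀ acc ic, (lines.foldl pvStepB (acc, ic, false, false)).1 = pvLoopA lines ic acc)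
    ∧ (∀ acc, (lines.foldl pvStepB (acc, true, true, false)).1 =
        match lines with
        | [] => acc
        | next :: rest =>
          if PySem.Str.strip next = "" then pvLoopA rest true acc
          else pvLoopA lines true acc)
    ∧ (∀ acc, (lines.foldl pvStepB (acc, false, false, true)).1 =
        match lines with
        | [] => acc
        | next :: _ =>
          pvLoopA lines false
            (if PySem.Str.strip next ≠ "" ∧ PySem.Str.strip next ≠ "```" then acc ++ [""] else acc)) := by
  induction lines with
  | nil => refine ⟨fun acc ic => ?_, fun acc => ?_, fun acc => ?_⟩ <;> simp [pvLoopA]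
  | cons line rest ih =>
    obtain ⟨ih1, ih2, ih3⟩ := ih
    refine ⟨fun acc ic => ?_, fun acc => ?_, fun acc => ?_⟩
    · -- plain state (no fence on the previous line)
      by_cases hf : PySem.Str.strip line = "```"
      · cases ic with
        | false =>
          have hstep : pvStepB (acc, false, false, false) line = (acc ++ [line], true, true, false) := by
            simp [pvStepB, hf]
          rw [List.foldl_cons, hstep, ih2]
          cases rest with
          | nil => conv_rhs => rw [pvLoopA.eq_def]
                   simp [pvLoopA, hf]
          | cons next rest2 =>
            by_cases hb : PySem.Str.strip next = "" <;>
              (conv_rhs => rw [pvLoopA.eq_def]) <;> simp [hf, hb]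
        | true =>
          have hstep : pvStepB (acc, true, false, false) line = (acc ++ [line], false, false, true) := by
            simp [pvStepB, hf]
          rw [List.foldl_cons, hstep, ih3]
          cases rest with
          | nil => conv_rhs => rw [pvLoopA.eq_def]
                   simp [pvLoopA, hf]
          | cons next rest2 =>
            by_cases hc : PySem.Str.strip next ≠ "" ∧ PySem.Str.strip next ≠ "```" <;>
              (conv_rhs => rw [pvLoopA.eq_def]) <;> simp [hf, hc]
      · have hstep : pvStepB (acc, ic, false, false) line = (acc ++ [line], ic, false, false) := by
          simp [pvStepB, hf]
        rw [List.foldl_cons, hstep, ih1]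
        conv_rhs => rw [pvLoopA.eq_def]
        simp [hf]
    · -- just after an opening fence
      by_cases hb : PySem.Str.strip line = ""
      · have hstep : pvStepB (acc, true, true, false) line = (acc, true, false, false) := by
          simp [pvStepB, hb]
        rw [List.foldl_cons, hstep, ih1]
        simp [hb]
      · by_cases hf : PySem.Str.strip line = "```"
        · have hstep : pvStepB (acc, true, true, false) line = (acc ++ [line], false, false, true) := by
            simp [pvStepB, hf]
          rw [List.foldl_cons, hstep, ih3]
          dsimp only
          rw [if_neg hb]
          cases rest with
          | nil => conv_rhs => rw [pvLoopA.eq_def]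
                   simp [pvLoopA, hf]
          | cons next rest2 =>
            by_cases hc : PySem.Str.strip next ≠ "" ∧ PySem.Str.strip next ≠ "```" <;>
              (conv_rhs => rw [pvLoopA.eq_def]) <;> simp [hf, hc]
        · have hstep : pvStepB (acc, true, true, false) line = (acc ++ [line], true, false, false) := by
            simp [pvStepB, hb, hf]
          rw [List.foldl_cons, hstep, ih1]
          dsimp only
          rw [if_neg hb]
          conv_rhs => rw [pvLoopA.eq_def]
          simp [hf]
    · -- just after a closing fence
      by_cases hc : PySem.Str.strip line ≠ "" ∧ PySem.Str.strip line ≠ "```"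
      · have hstep : pvStepB (acc, false, false, true) line = (acc ++ [""] ++ [line], false, false, false) := by
          simp [pvStepB, hc.1, hc.2]
        rw [List.foldl_cons, hstep, ih1]
        dsimp only
        rw [if_pos hc]
        conv_rhs => rw [pvLoopA.eq_def]
        simp [hc.2]
      · by_cases hf : PySem.Str.strip line = "```"
        · have hstep : pvStepB (acc, false, false, true) line = (acc ++ [line], true, true, false) := by
            simp [pvStepB, hf]
          have hcond : ¬ (PySem.Str.strip line ≠ "" ∧ PySem.Str.strip line ≠ "```") := by simp [hf]
          rw [List.foldl_cons, hstep, ih2]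
          dsimp only
          rw [if_neg hcond]
          cases rest with
          | nil => conv_rhs => rw [pvLoopA.eq_def]
                   simp [pvLoopA, hf]
          | cons next rest2 =>
            by_cases hb : PySem.Str.strip next = "" <;>
              (conv_rhs => rw [pvLoopA.eq_def]) <;> simp [hf, hb]
        · have hb : PySem.Str.strip line = "" := by tauto
          have hstep : pvStepB (acc, false, false, true) line = (acc ++ [line], false, false, false) := by
            simp [pvStepB, hb]
          have hcond : ¬ (PySem.Str.strip line ≠ "" ∧ PySem.Str.strip line ≠ "```") := by simp [hb]
          rw [List.foldl_cons, hstep, ih1]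
          dsimp only
          rw [if_neg hcond]
          conv_rhs => rw [pvLoopA.eq_def]
          simp [hb]

-- ===== VERDICT (by name: the statement is the Claim_ definition above) =====
theorem ensure_proper_code_block_spacing_spec : Claim_equal_ensure_proper_code_block_spacing := by
  intro content _
  unfold Spec_ensure_proper_code_block_spacing ensure_proper_code_block_spacing
    ensure_proper_code_block_spacing_alt
  rw [(pv_main (PySem.Str.splitlines content)).1 [] false]
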